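-- pv_equiv track=rewrite | github.com/Sher110106/HR-Agent | utils/plot_helpers.py | get_contextual_colors
-- ===== SOURCE A (Python) =====
-- from typing import Union, List, Optional
--
-- def get_hr_specific_colors():
--     """
--     Get HR-specific color palettes for contextual visualization.
--
--     Returns:
--         dict: Dictionary with HR-specific color schemes
--     """
--     return {
--         'attrition': ['#e74c3c', '#c0392b', '#a93226', '#922b21', '#7b241c'],
--         'retention': ['#27ae60', '#229954', '#1e8449', '#196f3d', '#145a32'],
--         'performance': ['#f39c12', '#e67e22', '#d35400', '#ba4a00', '#a04000'],
--         'neutral': ['#3498db', '#2980b9', '#1f618d', '#154360', '#0e2f44'],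
--         'gradient': ['#3498db', '#2980b9', '#1f618d', '#154360', '#0e2f44'],
--         'accessibility': ['#d73027', '#f46d43', '#fdae61', '#fee08b', '#e6f598', '#abdda4', '#66c2a5', '#3288bd'],
--         'modern': ['#2c3e50', '#34495e', '#3498db', '#2980b9', '#1abc9c', '#16a085', '#f39c12', '#e67e22']
--     }
--
-- def get_contextual_colors(data_type: str, values: List = None) -> List[str]:
--     """
--     Get contextual colors based on data type and values.
--
--     Args:
--         data_type: Type of data ('attrition', 'retention', 'performance', 'neutral')
--         values: Optional list of values to determine color intensity
--     Returns:
--         List[str]: Contextual color palette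
--     """
--     hr_colors = get_hr_specific_colors()
--
--     if data_type in hr_colors:
--         base_colors = hr_colors[data_type]
--     else:
--         base_colors = hr_colors['neutral']
--
--     if values and len(values) > len(base_colors):
--         # Extend palette if needed
--         while len(base_colors) < len(values):
--             base_colors.extend(base_colors[:len(values) - len(base_colors)])
--
--     return base_colors[:len(values)] if values else base_colors
-- ===== SOURCE B (Python) =====
-- from typing import List
--
-- _PALETTES = [
--     ('attrition', ['#e74c3c', '#c0392b', '#a93226', '#922b21', '#7b241c']),
--     ('retention', ['#27ae60', '#229954', '#1e8449', '#196f3d', '#145a32']),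
--     ('performance', ['#f39c12', '#e67e22', '#d35400', '#ba4a00', '#a04000']),
--     ('neutral', ['#3498db', '#2980b9', '#1f618d', '#154360', '#0e2f44']),
--     ('gradient', ['#3498db', '#2980b9', '#1f618d', '#154360', '#0e2f44']),
--     ('accessibility', ['#d73027', '#f46d43', '#fdae61', '#fee08b', '#e6f598', '#abdda4', '#66c2a5', '#3288bd']),
--     ('modern', ['#2c3e50', '#34495e', '#3498db', '#2980b9', '#1abc9c', '#16a085', '#f39c12', '#e67e22']),
-- ]
--
-- def _lookup(name):
--     for key, palette in _PALETTES:
--         if key == name: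
--             return palette
--     return None
--
-- def get_contextual_colors(data_type: str, values: List = None) -> List[str]:
--     base = _lookup(data_type)
--     if base is None:
--         base = _lookup('neutral')
--     if not values:
--         return base
--     out = []
--     i = 0  # cyclic pointer into base; always 0 <= i < len(base)
--     for _ in values:
--         out.append(base[i])
--         i = i + 1 if i + 1 < len(base) else 0
--     return out
-- ===== Notes on version B (the rewrite author's own statement) =====
-- stated objective: alternative
-- what changed: Replaces the dict lookup plus iterative palette-doubling while-extend loop and final slice by a linear scan of an association list and a single pass over values with a cyclic pointer appending one color per value.
import Mathlib
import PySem

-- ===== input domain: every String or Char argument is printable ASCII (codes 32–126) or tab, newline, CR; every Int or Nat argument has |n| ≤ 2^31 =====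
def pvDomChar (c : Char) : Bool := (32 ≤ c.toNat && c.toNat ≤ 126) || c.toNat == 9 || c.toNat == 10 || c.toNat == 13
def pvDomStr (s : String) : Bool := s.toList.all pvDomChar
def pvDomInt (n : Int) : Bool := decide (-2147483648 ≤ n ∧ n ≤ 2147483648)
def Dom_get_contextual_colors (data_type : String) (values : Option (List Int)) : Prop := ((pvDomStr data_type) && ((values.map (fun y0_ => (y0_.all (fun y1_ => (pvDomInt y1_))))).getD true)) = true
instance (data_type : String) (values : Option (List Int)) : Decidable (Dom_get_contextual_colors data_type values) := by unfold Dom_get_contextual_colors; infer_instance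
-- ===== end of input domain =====

-- B looks the palette up by a linear scan of an association list and builds the result in
-- ONE pass over values with a cyclic pointer, instead of A's dict lookup plus iterative
-- palette-doubling while-extend loop and final slice (objective: alternative); equal returns.
-- A mutates only a list freshly built inside the call, so no caller-visible mutation.

-- ===== PORT A =====

-- get_hr_specific_colors(): the dict literal, in insertion order
def hrColors : PySem.Dict String (List String) := PySem.Dict.mk
  [ ("attrition", ["#e74c3c", "#c0392b", "#a93226", "#922b21", "#7b241c"]),
    ("retention", ["#27ae60", "#229954", "#1e8449", "#196f3d", "#145a32"]),
    ("performance", ["#f39c12", "#e67e22", "#d35400", "#ba4a00", "#a04000"]),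
    ("neutral", ["#3498db", "#2980b9", "#1f618d", "#154360", "#0e2f44"]),
    ("gradient", ["#3498db", "#2980b9", "#1f618d", "#154360", "#0e2f44"]),
    ("accessibility", ["#d73027", "#f46d43", "#fdae61", "#fee08b", "#e6f598", "#abdda4", "#66c2a5", "#3288bd"]),
    ("modern", ["#2c3e50", "#34495e", "#3498db", "#2980b9", "#1abc9c", "#16a085", "#f39c12", "#e67e22"]) ]

-- the while-loop: while len(base) < n: base.extend(base[:n - len(base)])
-- (the 'base ≠ []' guard only makes the recursion total; it is always true at call sites)
def extendLoop (n : Nat) (base : List String) : List String :=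
  if h : base.length < n ∧ base ≠ [] then
    extendLoop n (base ++ base.take (n - base.length))
  else base
termination_by n - base.length
decreasing_by
  simp only [List.length_append, List.length_take]
  have : 0 < base.length := List.length_pos_of_ne_nil h.2
  omega

def get_contextual_colors (data_type : String) (values : Option (List Int)) : List String :=
  -- if data_type in hr_colors: base = hr_colors[data_type] else: base = hr_colors['neutral']
  let base :=
    match hrColors.get? data_type with
    | some c => c
    | none => hrColors.getD "neutral" []
  let vlist := values.getD []
  -- 'if values and len(values) > len(base_colors): while …'
  let base :=
    if vlist.isEmpty = false ∧ base.length < vlist.length then extendLoop vlist.length base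
    else base
  -- 'return base_colors[:len(values)] if values else base_colors'
  if vlist.isEmpty = false then base.take vlist.length else base

-- ===== PORT B =====

-- _PALETTES: an association list, scanned linearly by _lookup
def paletteTable : List (String × List String) :=
  [ ("attrition", ["#e74c3c", "#c0392b", "#a93226", "#922b21", "#7b241c"]),
    ("retention", ["#27ae60", "#229954", "#1e8449", "#196f3d", "#145a32"]),
    ("performance", ["#f39c12", "#e67e22", "#d35400", "#ba4a00", "#a04000"]),
    ("neutral", ["#3498db", "#2980b9", "#1f618d", "#154360", "#0e2f44"]),
    ("gradient", ["#3498db", "#2980b9", "#1f618d", "#154360", "#0e2f44"]),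
    ("accessibility", ["#d73027", "#f46d43", "#fdae61", "#fee08b", "#e6f598", "#abdda4", "#66c2a5", "#3288bd"]),
    ("modern", ["#2c3e50", "#34495e", "#3498db", "#2980b9", "#1abc9c", "#16a085", "#f39c12", "#e67e22"]) ]

-- _lookup(name): the for-loop over _PALETTES, first match wins
def lookupPalette (name : String) : List (String × List String) → Option (List String)
  | [] => none
  | (key, palette) :: rest =>
    if key == name then some palette else lookupPalette name rest

def get_contextual_colors_alt (data_type : String) (values : Option (List Int)) : List String :=
  let base :=
    match lookupPalette data_type paletteTable with
    | some b => b
    | none => (lookupPalette "neutral" paletteTable).getD []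
  match values with
  | none => base
  | some l =>
    if l.isEmpty then base
    else
      -- one pass: out.append(base[i]); i cycles; i is always in range (0 ≤ i < len(base)),
      -- so base[i] never raises and the getD default is never used
      (l.foldl
        (fun (s : List String × Nat) (_ : Int) =>
          (s.1 ++ [base.getD s.2 ""], if s.2 + 1 < base.length then s.2 + 1 else 0))
        ([], 0)).1

-- ===== PRECONDITION & SPEC =====
def Spec_get_contextual_colors (data_type : String) (values : Option (List Int)) (out : List String) : Prop := out = get_contextual_colors_alt data_type values
instance (data_type : String) (values : Option (List Int)) (out : List String) : Decidable (Spec_get_contextual_colors data_type values out) := by unfold Spec_get_contextual_colors; infer_instance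

-- ===== CLAIM (what is proved, stated in full; the proofs are below) =====
def Claim_equal_get_contextual_colors : Prop := ∀ (data_type : String) (values : Option (List Int)), Dom_get_contextual_colors data_type values → Spec_get_contextual_colors data_type values (get_contextual_colors data_type values)

-- ===== LEMMAS AND PROOFS =====

-- p repeated m times
def rep (m : Nat) (p : List String) : List String := (List.replicate m p).flatten

-- the cyclic palette of length n
def cyc (p : List String) (n : Nat) : List String :=
  (List.range n).map (fun i => p.getD (i % p.length) "")

theorem rep_succ (m : Nat) (p : List String) : rep (m + 1) p = p ++ rep m p := by
  simp [rep, List.replicate_succ]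

theorem rep_length (m : Nat) (p : List String) : (rep m p).length = m * p.length := by
  induction m with
  | zero => simp [rep]
  | succ m ih => simp [rep_succ, ih]; ring

theorem rep_add (m : Nat) (p : List String) : rep m p ++ rep m p = rep (m + m) p := by
  unfold rep
  rw [List.replicate_add, List.flatten_append]

theorem rep_getElem? (m : Nat) (p : List String) (i : Nat) (h : i < m * p.length) :
    (rep m p)[i]? = p[i % p.length]? := by
  induction m generalizing i with
  | zero => omega
  | succ m ih =>
    have hsm : (m + 1) * p.length = m * p.length + p.length := by ring
    rw [rep_succ]
    by_cases hi : i < p.length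
    · rw [List.getElem?_append_left hi, Nat.mod_eq_of_lt hi]
    · push_neg at hi
      rw [List.getElem?_append_right hi, ih _ (by omega)]
      conv_rhs => rw [show i = (i - p.length) + 1 * p.length by omega, Nat.add_mul_mod_self_right]

theorem cyc_getElem? (p : List String) (n i : Nat) :
    (cyc p n)[i]? = if i < n then some (p.getD (i % p.length) "") else none := by
  by_cases h : i < n
  · simp [cyc, List.getElem?_map, List.getElem?_range h, h]
  · rw [if_neg h, List.getElem?_eq_none (by simp [cyc]; omega)]

theorem getD_eq_getElem? (p : List String) (j : Nat) (h : j < p.length) :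
    some (p.getD j "") = p[j]? := by
  rw [List.getD_eq_getElem?_getD, List.getElem?_eq_getElem h]
  rfl

-- prefix of a repetition is the cyclic palette
theorem rep_take_eq_cyc (m : Nat) (p : List String) (hp : p ≠ []) (n : Nat)
    (h : n ≤ m * p.length) : (rep m p).take n = cyc p n := by
  have hL : 0 < p.length := List.length_pos_of_ne_nil hp
  apply List.ext_getElem?
  intro i
  rw [List.getElem?_take, cyc_getElem?]
  by_cases hi : i < n
  · rw [if_pos hi, if_pos hi, rep_getElem? m p i (by omega),
      ← getD_eq_getElem? p _ (Nat.mod_lt i hL)]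
  · rw [if_neg hi, if_neg hi]

-- the while-loop applied to a repetition, truncated, yields the cyclic palette
theorem extendLoop_take (p : List String) (hp : p ≠ []) :
    ∀ (k n m : Nat), 1 ≤ m → n ≤ m * p.length + k →
      (extendLoop n (rep m p)).take n = cyc p n := by
  have hL : 0 < p.length := List.length_pos_of_ne_nil hp
  intro k
  induction k using Nat.strong_induction_on with
  | _ k ih =>
  intro n m hm hbound
  have hml := rep_length m p
  have hpos : 0 < m * p.length := Nat.mul_pos (by omega) hL
  have hrepne : rep m p ≠ [] := List.ne_nil_of_length_pos (by omega)
  rw [extendLoop]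
  by_cases hlt : (rep m p).length < n
  · rw [dif_pos ⟨hlt, hrepne⟩]
    by_cases hbig : (rep m p).length ≤ n - (rep m p).length
    · -- doubling step: base ++ base = rep (m + m) p
      rw [List.take_of_length_le hbig, rep_add]
      have h2m : (m + m) * p.length = m * p.length + m * p.length := by ring
      exact ih (k - m * p.length) (by omega) n (m + m) (by omega) (by omega)
    · -- final step: the new list has length exactly n and is cyclic
      push_neg at hbig
      set q := n - (rep m p).length with hq
      have hnewlen : (rep m p ++ (rep m p).take q).length = n := by
        simp [List.length_take]
        omega
      rw [extendLoop, dif_neg (by rw [hnewlen]; omega),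
        List.take_of_length_le (by rw [hnewlen])]
      apply List.ext_getElem?
      intro i
      rw [cyc_getElem?]
      by_cases hi : i < n
      · rw [if_pos hi]
        by_cases hil : i < (rep m p).length
        · rw [List.getElem?_append_left hil, rep_getElem? m p i (by omega),
            ← getD_eq_getElem? p _ (Nat.mod_lt i hL)]
        · push_neg at hil
          rw [List.getElem?_append_right hil, List.getElem?_take,
            if_pos (by omega), rep_getElem? m p _ (by omega)]
          have hmod : (i - (rep m p).length) % p.length = i % p.length := by
            conv_rhs => rw [show i = (i - (rep m p).length) + m * p.length by omega,
              Nat.add_mul_mod_self_right]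
          rw [hmod, ← getD_eq_getElem? p _ (Nat.mod_lt i hL)]
      · rw [if_neg hi, List.getElem?_eq_none (by rw [hnewlen]; omega)]
  · rw [dif_neg (by tauto)]
    exact rep_take_eq_cyc m p hp n (by omega)

theorem rep_one (p : List String) : rep 1 p = p := by simp [rep]

-- A's palette lookup = B's palette lookup, and the palette is nonempty
set_option maxHeartbeats 1000000 in
theorem base_eq_and_ne_nil (data_type : String) :
    (match hrColors.get? data_type with
      | some c => c
      | none => hrColors.getD "neutral" []) =
      (match lookupPalette data_type paletteTable with
       | some b => b
       | none => (lookupPalette "neutral" paletteTable).getD []) ∧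
    (match hrColors.get? data_type with
      | some c => c
      | none => hrColors.getD "neutral" []) ≠ [] := by
  simp only [hrColors, paletteTable, lookupPalette, PySem.Dict.getD_eq_get?_getD,
    PySem.Dict.get?_mk_cons]
  split_ifs <;> simp_all [PySem.Dict.get?]

-- B's one-pass cyclic-pointer fold produces the cyclic palette
theorem foldl_cyclic (base : List String) (hb : base ≠ []) (l : List Int) :
    ∀ (out : List String) (i : Nat), i < base.length →
    (l.foldl
        (fun (s : List String × Nat) (_ : Int) =>
          (s.1 ++ [base.getD s.2 ""], if s.2 + 1 < base.length then s.2 + 1 else 0))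
        (out, i)).1
      = out ++ (List.range l.length).map (fun j => base.getD ((i + j) % base.length) "") := by
  have hL : 0 < base.length := List.length_pos_of_ne_nil hb
  induction l with
  | nil => intro out i _; simp
  | cons a t ih =>
    intro out i hi
    have hstep : (if i + 1 < base.length then i + 1 else 0) < base.length := by
      split_ifs <;> omega
    rw [List.foldl_cons, ih _ _ hstep, List.append_assoc, List.singleton_append,
      List.length_cons, List.range_succ_eq_map, List.map_cons, List.map_map]
    congr 1
    congr 1
    · rw [Nat.add_zero, Nat.mod_eq_of_lt hi]
    · apply List.map_congr_left
      intro j _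
      simp only [Function.comp_apply, Nat.succ_eq_add_one]
      have hidx : ((if i + 1 < base.length then i + 1 else 0) + j) % base.length
          = (i + (j + 1)) % base.length := by
        split_ifs with h
        · congr 1
          omega
        · have hieq : i + 1 = base.length := by omega
          conv_rhs => rw [show i + (j + 1) = j + 1 * base.length by omega,
            Nat.add_mul_mod_self_right]
          simp
      rw [hidx]

-- ===== VERDICT (by name: the statement is the Claim_ definition above) =====
theorem get_contextual_colors_spec : Claim_equal_get_contextual_colors := by
  intro data_type values _
  unfold Spec_get_contextual_colors get_contextual_colors get_contextual_colors_alt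
  obtain ⟨hbeq, hbne⟩ := base_eq_and_ne_nil data_type
  rw [← hbeq]
  set base := (match hrColors.get? data_type with
    | some c => c
    | none => hrColors.getD "neutral" []) with hbase
  have hL : 0 < base.length := List.length_pos_of_ne_nil hbne
  cases values with
  | none => simp
  | some l =>
    by_cases hl : l.isEmpty
    · simp [hl]
    · rw [Bool.not_eq_true] at hl
      have hn : 0 < l.length := by
        cases l with
        | nil => simp at hl
        | cons a t => simp
      simp only [Option.getD, hl, Bool.false_eq_true, if_false, true_and, if_true]
      have hB : (l.foldl
          (fun (s : List String × Nat) (_ : Int) =>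
            (s.1 ++ [base.getD s.2 ""], if s.2 + 1 < base.length then s.2 + 1 else 0))
          ([], 0)).1 = cyc base l.length := by
        rw [foldl_cyclic base hbne l [] 0 hL]
        simp [cyc]
      by_cases hlen : base.length < l.length
      · rw [if_pos hlen]
        have h := extendLoop_take base hbne l.length l.length 1 le_rfl (by omega)
        rw [rep_one] at h
        rw [h, hB]
      · rw [if_neg hlen]
        have h := rep_take_eq_cyc 1 base hbne l.length (by omega)
        rw [rep_one] at h
        rw [h, hB]
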